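-- pv_equiv track=rewrite | github.com/a01025667/TC2008B_A01025667 | Graphics/Unity/CG1/Assets/Scripts/tarea.py | generateFaces
-- ===== SOURCE A (Python) =====
-- def generateFaces(numSides):
--     faces = []
--     for i in range(numSides): # Bucle para generar las caras de la rueda
--         if i < numSides - 1: # Se verifica si es el último elemento
--             faces.append([1, 3 + i, 2 + i])
--             faces.append([numSides + 2, numSides + 3 + i, numSides + 4 + i])
--             faces.append([2 + i, 3 + i, numSides + 3 + i])
--             faces.append([3 + i, numSides + 4 + i, numSides + 3 + i])
--         else: # Se conecta el último elemento con el primero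
--             faces.append([1, 2, 2 + i])
--             faces.append([numSides + 2, numSides + 3 + i, numSides + 3])
--             faces.append([2 + i, 2, numSides + 3 + i])
--             faces.append([2, numSides + 3, numSides + 3 + i])
--     return faces
-- ===== SOURCE B (Python) =====
-- def generateFaces(numSides):
--     # Build the two vertex rings and their one-step rotations up front, then
--     # zip them: each zipped tuple carries a side's four corner indices, so the
--     # face list falls out of one comprehension with no index arithmetic or
--     # wrap-around branch in the loop.
--     top = list(range(2, numSides + 2))
--     bot = list(range(numSides + 3, 2 * numSides + 3))
--     nxt_top = top[1:] + top[:1]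
--     nxt_bot = bot[1:] + bot[:1]
--     return [face
--             for c, n, bc, bn in zip(top, nxt_top, bot, nxt_bot)
--             for face in ([1, n, c],
--                          [numSides + 2, bc, bn],
--                          [c, n, bc],
--                          [n, bn, bc])]
-- ===== Notes on version B (the rewrite author's own statement) =====
-- stated objective: simpler
-- what changed: Instead of branching on the last iteration with index arithmetic, B builds the top and bottom vertex rings and their one-step rotations as lists up front and zips the four rings, so each side's quad is read off a tuple with no wrap-around branch or per-face index computation.
import Mathlib
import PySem

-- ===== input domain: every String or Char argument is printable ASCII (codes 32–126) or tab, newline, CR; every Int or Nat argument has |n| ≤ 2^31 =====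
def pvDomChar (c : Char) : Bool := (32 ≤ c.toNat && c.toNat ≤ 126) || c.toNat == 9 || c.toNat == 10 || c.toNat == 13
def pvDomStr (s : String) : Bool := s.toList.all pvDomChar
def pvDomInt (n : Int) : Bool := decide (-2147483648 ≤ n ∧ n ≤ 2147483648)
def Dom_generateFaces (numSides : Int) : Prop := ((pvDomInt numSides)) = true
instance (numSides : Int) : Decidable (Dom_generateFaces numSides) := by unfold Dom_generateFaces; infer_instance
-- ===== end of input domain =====

-- B precomputes the top/bottom vertex rings and their one-step rotations, then zips them and emits each side's quad from the tuple — no per-iteration index arithmetic or wrap branch (same cost, simpler decomposition).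


-- ===== PORT A =====
def generateFaces (numSides : Int) : List (List Int) :=
  (PySem.List.pyRange 0 numSides 1).foldl (fun faces i =>
    if i < numSides - 1 then
      faces ++ [[1, 3 + i, 2 + i]]
            ++ [[numSides + 2, numSides + 3 + i, numSides + 4 + i]]
            ++ [[2 + i, 3 + i, numSides + 3 + i]]
            ++ [[3 + i, numSides + 4 + i, numSides + 3 + i]]
    else
      faces ++ [[1, 2, 2 + i]]
            ++ [[numSides + 2, numSides + 3 + i, numSides + 3]]
            ++ [[2 + i, 2, numSides + 3 + i]]
            ++ [[2, numSides + 3, numSides + 3 + i]]) []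

-- ===== PORT B =====
def generateFaces_alt (numSides : Int) : List (List Int) :=
  let top := PySem.List.pyRange 2 (numSides + 2) 1
  let bot := PySem.List.pyRange (numSides + 3) (2 * numSides + 3) 1
  let nxtTop := PySem.List.slice top (some 1) none ++ PySem.List.slice top none (some 1)
  let nxtBot := PySem.List.slice bot (some 1) none ++ PySem.List.slice bot none (some 1)
  ((top.zip nxtTop).zip (bot.zip nxtBot)).flatMap (fun p =>
    let c := p.1.1
    let n := p.1.2
    let bc := p.2.1
    let bn := p.2.2
    [[1, n, c], [numSides + 2, bc, bn], [c, n, bc], [n, bn, bc]])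

-- ===== PRECONDITION & SPEC =====
def Spec_generateFaces (numSides : Int) (out : List (List Int)) : Prop := out = generateFaces_alt numSides
instance (numSides : Int) (out : List (List Int)) : Decidable (Spec_generateFaces numSides out) := by unfold Spec_generateFaces; infer_instance

-- ===== CLAIM (what is proved, stated in full; the proofs are below) =====
def Claim_equal_generateFaces : Prop := ∀ (numSides : Int), Dom_generateFaces numSides → Spec_generateFaces numSides (generateFaces numSides)

-- ===== LEMMAS AND PROOFS =====

-- A's per-iteration block, as the list it appends for index i
def quadA (numSides : Int) (i : Int) : List (List Int) :=
  if i < numSides - 1 then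
    [[1, 3 + i, 2 + i],
     [numSides + 2, numSides + 3 + i, numSides + 4 + i],
     [2 + i, 3 + i, numSides + 3 + i],
     [3 + i, numSides + 4 + i, numSides + 3 + i]]
  else
    [[1, 2, 2 + i],
     [numSides + 2, numSides + 3 + i, numSides + 3],
     [2 + i, 2, numSides + 3 + i],
     [2, numSides + 3, numSides + 3 + i]]

-- B's per-side block for side j of k, after the rings are rewritten as maps over List.range
def quadB (numSides : Int) (k j : Nat) : List (List Int) :=
  let c : Int := 2 + (j : Int)
  let n : Int := 2 + (if j + 1 < k then ((j : Int) + 1) else 0)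
  let bc : Int := numSides + 3 + (j : Int)
  let bn : Int := numSides + 3 + (if j + 1 < k then ((j : Int) + 1) else 0)
  [[1, n, c], [numSides + 2, bc, bn], [c, n, bc], [n, bn, bc]]

theorem generateFaces_eq_flatMap (numSides : Int) :
    generateFaces numSides = (PySem.List.pyRange 0 numSides 1).flatMap (quadA numSides) := by
  unfold generateFaces
  have hc : (PySem.List.pyRange 0 numSides 1).foldl (fun faces i =>
      if i < numSides - 1 then
        faces ++ [[1, 3 + i, 2 + i]]
              ++ [[numSides + 2, numSides + 3 + i, numSides + 4 + i]]
              ++ [[2 + i, 3 + i, numSides + 3 + i]]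
              ++ [[3 + i, numSides + 4 + i, numSides + 3 + i]]
      else
        faces ++ [[1, 2, 2 + i]]
              ++ [[numSides + 2, numSides + 3 + i, numSides + 3]]
              ++ [[2 + i, 2, numSides + 3 + i]]
              ++ [[2, numSides + 3, numSides + 3 + i]]) []
      = (PySem.List.pyRange 0 numSides 1).foldl (fun acc i => acc ++ quadA numSides i) [] := by
    apply PySem.List.foldl_congr_mem
    intro acc i _
    by_cases hi : i < numSides - 1 <;> simp [quadA, hi]
  rw [hc, PySem.List.foldl_append_eq_flatMap, List.nil_append]

theorem slice_from_one' {a : Type} (xs : List a) :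
    PySem.List.slice xs (some 1) none = xs.drop 1 := by
  have := PySem.List.slice_from_natCast (xs := xs) (a := 1)
  simpa using this

theorem slice_to_one' {a : Type} (xs : List a) :
    PySem.List.slice xs none (some 1) = xs.take 1 := by
  have := PySem.List.slice_to_natCast (xs := xs) (b := 1)
  simpa using this

-- the rotated index list: List.range k shifted one step with wrap-around
theorem range_rotate (k : Nat) :
    (List.range k).drop 1 ++ (List.range k).take 1
      = (List.range k).map (fun j => if j + 1 < k then j + 1 else 0) := by
  apply List.ext_getElem
  · simp only [List.length_append, List.length_drop, List.length_take, List.length_range,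
      List.length_map]
    omega
  · intro i h1 h2
    simp only [List.length_append, List.length_drop, List.length_take, List.length_range] at h1
    by_cases hi : i < k - 1
    · rw [List.getElem_append_left (by simp; omega)]
      simp only [List.getElem_drop, List.getElem_range, List.getElem_map]
      rw [if_pos (by omega)]
      omega
    · have hk : 0 < k := by omega
      have hi' : i = k - 1 := by omega
      rw [List.getElem_append_right (by simp; omega)]
      simp only [List.getElem_take, List.getElem_range, List.getElem_map, List.length_drop,
        List.length_range]
      rw [if_neg (by omega)]
      omega

-- B's zipped list, rewritten as a flatMap of quadB over List.range
theorem generateFaces_alt_eq_flatMap (numSides : Int) :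
    generateFaces_alt numSides
      = (List.range numSides.toNat).flatMap (quadB numSides numSides.toNat) := by
  have e1 : numSides + 2 - 2 = numSides := by ring
  have e2 : 2 * numSides + 3 - (numSides + 3) = numSides := by ring
  show ((((PySem.List.pyRange 2 (numSides + 2) 1).zip
      (PySem.List.slice (PySem.List.pyRange 2 (numSides + 2) 1) (some 1) none ++
       PySem.List.slice (PySem.List.pyRange 2 (numSides + 2) 1) none (some 1))).zip
      ((PySem.List.pyRange (numSides + 3) (2 * numSides + 3) 1).zip
      (PySem.List.slice (PySem.List.pyRange (numSides + 3) (2 * numSides + 3) 1) (some 1) none ++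
       PySem.List.slice (PySem.List.pyRange (numSides + 3) (2 * numSides + 3) 1) none (some 1)))).flatMap
      (fun p => [[1, p.1.2, p.1.1], [numSides + 2, p.2.1, p.2.2],
                 [p.1.1, p.1.2, p.2.1], [p.1.2, p.2.2, p.2.1]]))
      = (List.range numSides.toNat).flatMap (quadB numSides numSides.toNat)
  rw [slice_from_one', slice_to_one', slice_from_one', slice_to_one',
      PySem.List.pyRange_one, PySem.List.pyRange_one, e1, e2,
      ← List.map_drop, ← List.map_take, ← List.map_drop, ← List.map_take,
      ← List.map_append, ← List.map_append, range_rotate,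
      List.map_map, List.map_map, List.zip_map', List.zip_map', List.zip_map',
      List.flatMap_def, List.map_map]
  rw [List.flatMap_def]
  apply congrArg List.flatten
  apply List.map_congr_left
  intro j _
  by_cases h : j + 1 < numSides.toNat <;>
    simp only [Function.comp, quadB, h, if_pos, List.cons.injEq, and_true,
      true_and] <;> push_cast [h] <;> ring_nf <;> simp

-- ===== VERDICT (by name: the statement is the Claim_ definition above) =====
theorem generateFaces_spec : Claim_equal_generateFaces := by
  intro numSides _
  unfold Spec_generateFaces
  rw [generateFaces_eq_flatMap, generateFaces_alt_eq_flatMap, PySem.List.pyRange_one]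
  simp only [Int.sub_zero, List.flatMap_def, List.map_map]
  apply congrArg List.flatten
  apply List.map_congr_left
  intro j hj
  have hjk : j < numSides.toNat := List.mem_range.mp hj
  have hn : (0 : Int) < numSides := by omega
  unfold quadA quadB Function.comp
  by_cases h : j + 1 < numSides.toNat
  · have hlt : (0 : Int) + (j : Int) < numSides - 1 := by omega
    simp only [if_pos hlt, if_pos h]
    ring_nf
  · have hlt : ¬ ((0 : Int) + (j : Int) < numSides - 1) := by omega
    have hj' : (j : Int) = numSides - 1 := by omega
    simp only [if_neg hlt, if_neg h]
    push_cast [hj']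
    ring_nf
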